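-- pv_equiv track=rewrite | github.com/zzsfornlp/zmsp | msp2/scripts/ud/assign_p2d/assign_anns_v2.py | _delete_single_match
-- ===== SOURCE A (Python) =====
-- def _delete_single_match(matched_pairs):
--     _dels = []
--     for ii in range(1, len(matched_pairs)-1):
--         m0, mc, m1 = [matched_pairs[ii+z] for z in [-1,0,1]]
--         if (mc[0]==m0[0]+1 and mc[1]==m0[1]+1) or (mc[0]==m1[0]-1 and mc[1]==m1[1]-1):
--             pass
--         else:
--             _dels.append(ii)
--     _survives = sorted(set(range(len(matched_pairs))) - set(_dels))
--     ret = [matched_pairs[z] for z in _survives]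
--     return ret
-- ===== SOURCE B (Python) =====
-- def _delete_single_match(matched_pairs):
--     # Group the pairs into maximal runs of diagonally consecutive matches,
--     # then drop every interior run of length 1 (the "single matches");
--     # the first and the last run always survive since they contain the endpoints.
--     runs = []
--     cur = []
--     for p in matched_pairs:
--         if cur and p[0] == cur[-1][0] + 1 and p[1] == cur[-1][1] + 1:
--             cur.append(p)
--         else:
--             if cur:
--                 runs.append(cur)
--             cur = [p]
--     if cur:
--         runs.append(cur)
--     out = []
--     for k, r in enumerate(runs):
--         if len(r) >= 2 or k == 0 or k == len(runs) - 1: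
--             out.extend(r)
--     return out
-- ===== Notes on version B (the rewrite author's own statement) =====
-- stated objective: alternative
-- what changed: Instead of A's sliding-window collection of deletion indices followed by a set difference over range(n), a sort and a reindexing pass, B groups the pairs into maximal runs of diagonally consecutive matches and emits every run except interior runs of length 1.
import Mathlib
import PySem

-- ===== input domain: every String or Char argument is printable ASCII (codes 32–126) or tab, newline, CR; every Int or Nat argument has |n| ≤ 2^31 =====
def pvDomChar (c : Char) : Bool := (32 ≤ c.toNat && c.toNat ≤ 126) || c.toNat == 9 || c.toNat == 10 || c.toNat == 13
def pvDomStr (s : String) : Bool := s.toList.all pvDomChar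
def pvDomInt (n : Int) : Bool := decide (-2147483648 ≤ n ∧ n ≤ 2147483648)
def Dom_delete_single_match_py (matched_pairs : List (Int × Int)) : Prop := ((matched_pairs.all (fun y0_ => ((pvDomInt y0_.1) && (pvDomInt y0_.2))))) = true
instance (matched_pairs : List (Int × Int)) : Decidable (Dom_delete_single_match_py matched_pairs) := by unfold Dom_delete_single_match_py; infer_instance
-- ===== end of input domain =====

-- B replaces A's scheme (sliding-window deletion indices, set difference over range(n),
-- sort, reindex) by grouping the pairs into maximal runs of diagonally consecutive
-- matches and dropping interior singleton runs (objective: alternative algorithm).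

-- ===== PORT A =====
-- Port of A. The indexing `matched_pairs[ii+z]` and `matched_pairs[z]` in A is always in
-- range for the indices A uses, so it is ported with the total `pyGetD` (exact here).
def delete_single_match_py (matched_pairs : List (Int × Int)) : List (Int × Int) :=
  let n : Int := matched_pairs.length
  let dels : List Int := (PySem.List.pyRange 1 (n - 1) 1).foldl (fun acc ii =>
      let m0 := PySem.List.pyGetD matched_pairs (ii + (-1)) (0, 0)
      let mc := PySem.List.pyGetD matched_pairs (ii + 0) (0, 0)
      let m1 := PySem.List.pyGetD matched_pairs (ii + 1) (0, 0)
      if ((mc.1 == m0.1 + 1) && (mc.2 == m0.2 + 1)) || ((mc.1 == m1.1 - 1) && (mc.2 == m1.2 - 1))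
      then acc
      else acc ++ [ii]) []
  let survives : List Int :=
    PySem.List.sorted
      (PySem.Set.diff (PySem.Set.ofList (PySem.List.pyRange 0 n 1)) (PySem.Set.ofList dels))
      (fun x => x)
  survives.map (fun z => PySem.List.pyGetD matched_pairs z (0, 0))

-- ===== PORT B =====
-- `p[0] == cur[-1][0] + 1 and p[1] == cur[-1][1] + 1` (diagonal adjacency of two pairs)
def pvLink (q p : Int × Int) : Bool := (p.1 == q.1 + 1) && (p.2 == q.2 + 1)

-- one iteration of Source B's grouping loop; state = (runs, cur); `cur.getLast?` is `cur[-1]`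
-- guarded by `if cur` (none exactly when cur is empty)
def pvStepB (st : List (List (Int × Int)) × List (Int × Int)) (p : Int × Int) :
    List (List (Int × Int)) × List (Int × Int) :=
  match st.2.getLast? with
  | some q => if pvLink q p then (st.1, st.2 ++ [p]) else (st.1 ++ [st.2], [p])
  | none => (st.1, [p])

def delete_single_match_py_alt (matched_pairs : List (Int × Int)) : List (Int × Int) :=
  let st := matched_pairs.foldl pvStepB ([], [])
  let runs := if st.2.isEmpty then st.1 else st.1 ++ [st.2]
  (PySem.List.enumerate runs 0).foldl (fun out kr =>
      if 2 ≤ kr.2.length ∨ kr.1 = 0 ∨ kr.1 = (runs.length : Int) - 1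
      then out ++ kr.2 else out) []

-- ===== PRECONDITION & SPEC =====
def Spec_delete_single_match_py (matched_pairs : List (Int × Int)) (out : List (Int × Int)) : Prop := out = delete_single_match_py_alt matched_pairs
instance (matched_pairs : List (Int × Int)) (out : List (Int × Int)) : Decidable (Spec_delete_single_match_py matched_pairs out) := by unfold Spec_delete_single_match_py; infer_instance

-- ===== CLAIM (what is proved, stated in full; the proofs are below) =====
def Claim_equal_delete_single_match_py : Prop := ∀ (matched_pairs : List (Int × Int)), Dom_delete_single_match_py matched_pairs → Spec_delete_single_match_py matched_pairs (delete_single_match_py matched_pairs)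

-- ===== LEMMAS AND PROOFS =====

-- ---- A-side canonical form: head :: (surviving middles) ++ [last] ----

-- A's window condition on a middle element
def pvKeepB (m0 mc m1 : Int × Int) : Bool :=
  ((mc.1 == m0.1 + 1) && (mc.2 == m0.2 + 1)) || ((mc.1 == m1.1 - 1) && (mc.2 == m1.2 - 1))

-- the surviving middle elements, as one recursive sweep over windows of three
def pvMids : List (Int × Int) → List (Int × Int)
  | a :: b :: c :: rest => (if pvKeepB a b c then [b] else []) ++ pvMids (b :: c :: rest)
  | _ => []

-- the keep-condition read off at Nat window position k (center index k + 1)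
def pvKeepAt (mp : List (Int × Int)) (k : Nat) : Bool :=
  pvKeepB (mp.getD k (0, 0)) (mp.getD (k + 1) (0, 0)) (mp.getD (k + 2) (0, 0))

theorem pvMids_idx (mp : List (Int × Int)) :
    ((List.range (mp.length - 2)).filter (fun k => pvKeepAt mp k)).map
      (fun k => mp.getD (k + 1) (0, 0)) = pvMids mp := by
  induction mp using pvMids.induct with
  | case1 a b c rest ih =>
      have hlen : (a :: b :: c :: rest).length - 2 = rest.length + 1 := by simp
      rw [hlen, List.range_succ_eq_map]
      have hlen2 : (b :: c :: rest).length - 2 = rest.length := by simp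
      rw [hlen2] at ih
      simp only [List.filter_cons, List.filter_map, pvMids]
      have h0 : pvKeepAt (a :: b :: c :: rest) 0 = pvKeepB a b c := by
        simp [pvKeepAt]
      have hsh : (fun k => pvKeepAt (a :: b :: c :: rest) k) ∘ Nat.succ
          = fun k => pvKeepAt (b :: c :: rest) k := by
        funext k; simp [pvKeepAt]
      rw [h0, hsh]
      by_cases hk : pvKeepB a b c = true <;>
        simp [hk, Function.comp_def, ← ih]
  | case2 mp h =>
      match mp, h with
      | [], _ => rfl
      | [a], _ => rfl
      | [a, b], _ => rfl
      | a :: b :: c :: r, h => exact absurd rfl (h a b c r)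

theorem pvRangeSplit (N : Int) (h : 2 ≤ N) :
    PySem.List.pyRange 0 N 1 = 0 :: (PySem.List.pyRange 1 (N - 1) 1 ++ [N - 1]) := by
  obtain ⟨m, rfl⟩ : ∃ m : Nat, N = (m : Int) + 2 := ⟨(N - 2).toNat, by omega⟩
  rw [PySem.List.pyRange_one, PySem.List.pyRange_one]
  have h1 : ((m : Int) + 2 - 0).toNat = m + 2 := by omega
  have h2 : ((m : Int) + 2 - 1 - 1).toNat = m := by omega
  rw [h1, h2, List.range_succ_eq_map, List.range_succ]
  simp [List.map_map, Function.comp_def]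
  exact ⟨fun a _ => by ring, by ring⟩

-- A's result in canonical form, for lists of length ≥ 3
theorem pvA_canon (mp : List (Int × Int)) (h3 : 3 ≤ mp.length) :
    delete_single_match_py mp
      = mp.getD 0 (0, 0) :: (pvMids mp ++ [mp.getD (mp.length - 1) (0, 0)]) := by
  show ((PySem.List.sorted
      (PySem.Set.diff (PySem.Set.ofList (PySem.List.pyRange 0 (mp.length : Int) 1))
        (PySem.Set.ofList ((PySem.List.pyRange 1 ((mp.length : Int) - 1) 1).foldl (fun acc ii =>
          let m0 := PySem.List.pyGetD mp (ii + (-1)) (0, 0)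
          let mc := PySem.List.pyGetD mp (ii + 0) (0, 0)
          let m1 := PySem.List.pyGetD mp (ii + 1) (0, 0)
          if ((mc.1 == m0.1 + 1) && (mc.2 == m0.2 + 1)) || ((mc.1 == m1.1 - 1) && (mc.2 == m1.2 - 1))
          then acc
          else acc ++ [ii]) [])))
      (fun x => x)).map (fun z => PySem.List.pyGetD mp z (0, 0))) = _
  -- step 1: the foldl collecting `_dels` is a filter over the index range
  have hfun : (fun (acc : List Int) (ii : Int) =>
      let m0 := PySem.List.pyGetD mp (ii + (-1)) (0, 0)
      let mc := PySem.List.pyGetD mp (ii + 0) (0, 0)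
      let m1 := PySem.List.pyGetD mp (ii + 1) (0, 0)
      if ((mc.1 == m0.1 + 1) && (mc.2 == m0.2 + 1)) || ((mc.1 == m1.1 - 1) && (mc.2 == m1.2 - 1))
      then acc
      else acc ++ [ii])
      = (fun acc x => if (!(pvKeepB (PySem.List.pyGetD mp (x + (-1)) (0, 0)) (PySem.List.pyGetD mp (x + 0) (0, 0)) (PySem.List.pyGetD mp (x + 1) (0, 0)))) = true then acc ++ [(fun ii => ii) x] else acc) := by
    funext acc ii
    simp only [pvKeepB]
    split <;> split <;> simp_all <;> tauto
  rw [hfun, PySem.List.foldl_append_if, List.nil_append, List.map_id']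
  set dels := ((PySem.List.pyRange 1 ((mp.length : Int) - 1) 1).filter
      (fun ii => !(pvKeepB (PySem.List.pyGetD mp (ii + (-1)) (0, 0)) (PySem.List.pyGetD mp (ii + 0) (0, 0)) (PySem.List.pyGetD mp (ii + 1) (0, 0))))) with hdels
  -- step 2: both `set(...)` builds are over duplicate-free lists
  have hnd : dels.Nodup := (PySem.List.nodup_pyRange_one 1 _).filter _
  rw [PySem.Set.ofList_eq_self_of_nodup _ (PySem.List.nodup_pyRange_one 0 _),
      PySem.Set.ofList_eq_self_of_nodup _ hnd]
  -- step 3: set difference keeps the range's own (already sorted) order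
  have hdiff : PySem.Set.diff (PySem.List.pyRange 0 (mp.length : Int) 1) dels
      = (PySem.List.pyRange 0 (mp.length : Int) 1).filter (fun x => !dels.contains x) := rfl
  rw [hdiff]
  rw [PySem.List.sorted_eq_of_perm_of_pairwise_lt _ _ _ (List.Perm.refl _)
    ((PySem.List.pairwise_lt_pyRange_one 0 _).filter _)]
  -- step 4: split off index 0 and index n-1, which are never deleted
  have hmem : ∀ x : Int, x ∈ dels → 1 ≤ x ∧ x < (mp.length : Int) - 1 := by
    intro x hx
    rw [hdels, List.mem_filter] at hx
    exact PySem.List.mem_pyRange_one.mp hx.1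
  rw [pvRangeSplit _ (by omega)]
  rw [List.filter_cons, List.filter_append]
  have hc0 : (!dels.contains (0 : Int)) = true := by
    simp only [Bool.not_eq_true']
    rw [List.contains_eq_mem]
    by_contra hmm
    simp only [decide_eq_false_iff_not, Decidable.not_not] at hmm
    have := hmem 0 hmm; omega
  have hcl : (([((mp.length : Int) - 1)]).filter (fun x => !dels.contains x)) = [((mp.length : Int) - 1)] := by
    rw [List.filter_cons]
    have hlast : (!dels.contains ((mp.length : Int) - 1)) = true := by
      simp only [Bool.not_eq_true']
      rw [List.contains_eq_mem]
      by_contra hmm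
      simp only [decide_eq_false_iff_not, Decidable.not_not] at hmm
      have := hmem _ hmm; omega
    rw [hlast]; rfl
  rw [hc0, hcl]
  -- step 5: an interior index survives exactly when its window condition holds
  have hmid : (PySem.List.pyRange 1 ((mp.length : Int) - 1) 1).filter (fun x => !dels.contains x)
      = (PySem.List.pyRange 1 ((mp.length : Int) - 1) 1).filter
          (fun ii => (pvKeepB (PySem.List.pyGetD mp (ii + (-1)) (0, 0)) (PySem.List.pyGetD mp (ii + 0) (0, 0)) (PySem.List.pyGetD mp (ii + 1) (0, 0)))) := by
    apply List.filter_congr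
    intro x hx
    rw [hdels]
    simp only [Bool.not_eq_true', List.contains_eq_mem, List.mem_filter]
    by_cases hk : pvKeepB (PySem.List.pyGetD mp (x + (-1)) (0, 0)) (PySem.List.pyGetD mp (x + 0) (0, 0)) (PySem.List.pyGetD mp (x + 1) (0, 0)) = true
    · simp [hx]
    · simp [hx]
  rw [hmid]
  simp only [if_true]
  simp only [List.map_cons, List.map_append]
  -- step 6: move to Nat indices and recognise pvMids
  congr 1
  · exact PySem.List.pyGetD_ofNat' mp 0 (0, 0)
  congr 1
  · rw [PySem.List.pyRange_one]
    have ht : (((mp.length : Int) - 1) - 1).toNat = mp.length - 2 := by omega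
    rw [ht, List.filter_map, List.map_map]
    have hfilt : ((fun ii => pvKeepB (PySem.List.pyGetD mp (ii + (-1)) (0, 0)) (PySem.List.pyGetD mp (ii + 0) (0, 0)) (PySem.List.pyGetD mp (ii + 1) (0, 0))) ∘ (fun k : Nat => (1 : Int) + ↑k))
        = fun k => pvKeepAt mp k := by
      funext k
      simp only [Function.comp_apply, pvKeepAt]
      have e0 : (1 : Int) + (k : Int) + -1 = ((k : Nat) : Int) := by omega
      have e1 : (1 : Int) + (k : Int) + 0 = (((k + 1 : Nat)) : Int) := by omega
      have e2 : (1 : Int) + (k : Int) + 1 = (((k + 2 : Nat)) : Int) := by omega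
      rw [e0, e1, e2, PySem.List.pyGetD_natCast, PySem.List.pyGetD_natCast, PySem.List.pyGetD_natCast]
    have hmapg : ((fun z => PySem.List.pyGetD mp z (0, 0)) ∘ (fun k : Nat => (1 : Int) + ↑k))
        = fun k : Nat => mp.getD (k + 1) (0, 0) := by
      funext k
      simp only [Function.comp_apply]
      have e1 : (1 : Int) + (k : Int) = (((k + 1 : Nat)) : Int) := by omega
      rw [e1, PySem.List.pyGetD_natCast]
    rw [hfilt, hmapg, pvMids_idx]
  · have e : ((mp.length : Int) - 1) = (((mp.length - 1 : Nat)) : Int) := by omega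
    rw [e, PySem.List.pyGetD_natCast]
    simp

-- ---- B-side: the run decomposition and its emission, in recursive form ----

-- the runs produced by Source B's grouping loop when the current run is `cur` (nonempty)
def pvGlue (cur : List (Int × Int)) : List (Int × Int) → List (List (Int × Int))
  | [] => [cur]
  | p :: t =>
      match cur.getLast? with
      | some q => if pvLink q p then pvGlue (cur ++ [p]) t else cur :: pvGlue [p] t
      | none => pvGlue [p] t

-- Source B's emission filter, for the runs after the first (kept iff length ≥ 2 or last)
def pvEmitRest : List (List (Int × Int)) → List (Int × Int)
  | [] => []
  | [r] => r
  | r :: r' :: t => (if 2 ≤ r.length then r else []) ++ pvEmitRest (r' :: t)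

-- Source B's emission filter for the whole runs list (first run always kept)
def pvEmitAll : List (List (Int × Int)) → List (Int × Int)
  | [] => []
  | r :: rs => r ++ pvEmitRest rs

-- the elements of `l` that survive, given that `q` immediately precedes `l`
def pvTail (q : Int × Int) : List (Int × Int) → List (Int × Int)
  | [] => []
  | [p] => [p]
  | p :: p' :: t => (if pvLink q p || pvLink p p' then [p] else []) ++ pvTail p (p' :: t)

-- whether a non-first run `cur` ending in `q` survives when `l` still follows
def pvKeepRun (cur : List (Int × Int)) (q : Int × Int) (l : List (Int × Int)) : Bool :=
  decide (2 ≤ cur.length) || (match l with | [] => true | p :: _ => pvLink q p)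

theorem pvGlue_ne_nil (cur : List (Int × Int)) (l : List (Int × Int)) :
    pvGlue cur l ≠ [] := by
  induction l generalizing cur with
  | nil => simp [pvGlue]
  | cons p t ih =>
      rw [pvGlue]
      match h : cur.getLast? with
      | some q =>
          by_cases hl : pvLink q p = true
          · simpa [hl] using ih (cur ++ [p])
          · simp [hl]
      | none => exact ih [p]

-- the grouping foldl of the port computes pvGlue
theorem pvFoldGlue (l : List (Int × Int)) (runs : List (List (Int × Int)))
    (cur : List (Int × Int)) (hc : cur ≠ []) :
    (if (List.foldl pvStepB (runs, cur) l).2.isEmpty then (List.foldl pvStepB (runs, cur) l).1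
     else (List.foldl pvStepB (runs, cur) l).1 ++ [(List.foldl pvStepB (runs, cur) l).2])
      = runs ++ pvGlue cur l := by
  induction l generalizing runs cur with
  | nil => simp [pvGlue, List.isEmpty_iff, hc]
  | cons p t ih =>
      obtain ⟨q, hq⟩ : ∃ q, cur.getLast? = some q := by
        cases h : cur.getLast? with
        | some q => exact ⟨q, rfl⟩
        | none => exact absurd (List.getLast?_eq_none_iff.mp h) hc
      rw [List.foldl_cons]
      show (if (List.foldl pvStepB (pvStepB (runs, cur) p) t).2.isEmpty then _ else _) = _
      simp only [pvGlue, hq]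
      by_cases hl : pvLink q p = true
      · have hstep : pvStepB (runs, cur) p = (runs, cur ++ [p]) := by
          simp [pvStepB, hq, hl]
        rw [hstep, if_pos hl, ih runs (cur ++ [p]) (by simp)]
      · have hstep : pvStepB (runs, cur) p = (runs ++ [cur], [p]) := by
          simp [pvStepB, hq, hl]
        rw [hstep, if_neg hl, ih (runs ++ [cur]) [p] (by simp), List.append_assoc]
        rfl

-- emission of all runs after the first, by index positions
theorem pvEnumRest (rs : List (List (Int × Int))) (s N : Int) (hs : 1 ≤ s)
    (hN : s + rs.length = N) :
    (PySem.List.enumerate rs s).flatMap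
      (fun kr => if 2 ≤ kr.2.length ∨ kr.1 = 0 ∨ kr.1 = N - 1 then kr.2 else [])
      = pvEmitRest rs := by
  induction rs generalizing s with
  | nil => simp [PySem.List.enumerate_nil, pvEmitRest]
  | cons r rs ih =>
      rw [PySem.List.enumerate_cons, List.flatMap_cons]
      cases rs with
      | nil =>
          have hlast : s = N - 1 := by simp at hN; omega
          rw [if_pos (Or.inr (Or.inr hlast))]
          simp [PySem.List.enumerate_nil, pvEmitRest]
      | cons r' t =>
          have hns : ¬ (s = 0) := by omega
          have hnl : ¬ (s = N - 1) := by
            simp only [List.length_cons] at hN; push_cast at hN; omega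
          rw [ih (s + 1) (by omega) (by simp at hN ⊢; omega)]
          show (if 2 ≤ r.length ∨ s = 0 ∨ s = N - 1 then r else []) ++ _ = _
          rw [pvEmitRest]
          congr 1
          by_cases h2 : 2 ≤ r.length
          · rw [if_pos (Or.inl h2), if_pos h2]
          · rw [if_neg (by tauto), if_neg h2]

-- the emission foldl of the port computes pvEmitAll
theorem pvEnumEmit (r : List (Int × Int)) (rs : List (List (Int × Int))) :
    (PySem.List.enumerate (r :: rs) 0).foldl (fun out kr =>
        if 2 ≤ kr.2.length ∨ kr.1 = 0 ∨ kr.1 = (((r :: rs).length : Nat) : Int) - 1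
        then out ++ kr.2 else out) []
      = pvEmitAll (r :: rs) := by
  have hfun : (fun (out : List (Int × Int)) kr =>
      if 2 ≤ kr.2.length ∨ kr.1 = 0 ∨ kr.1 = (((r :: rs).length : Nat) : Int) - 1
      then out ++ kr.2 else out)
      = fun (out : List (Int × Int)) (kr : Int × List (Int × Int)) => out ++ (if 2 ≤ kr.2.length ∨ kr.1 = 0 ∨ kr.1 = (((r :: rs).length : Nat) : Int) - 1 then kr.2 else []) := by
    funext out kr; split <;> simp
  rw [hfun, PySem.List.foldl_append_eq_flatMap, List.nil_append]
  rw [PySem.List.enumerate_cons, List.flatMap_cons, if_pos (Or.inr (Or.inl rfl))]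
  simp only [zero_add]
  rw [pvEnumRest rs 1 ((r :: rs).length : Int) (le_refl 1) (by simp; omega)]
  rfl

-- a surviving non-first run contributes itself iff pvKeepRun
theorem pvEmitRest_glue (l : List (Int × Int)) (cur : List (Int × Int)) (q : Int × Int)
    (hq : cur.getLast? = some q) :
    pvEmitRest (pvGlue cur l) = (if pvKeepRun cur q l then cur else []) ++ pvTail q l := by
  induction l generalizing cur q with
  | nil => simp [pvGlue, pvEmitRest, pvKeepRun, pvTail]
  | cons p t ih =>
      have hc : cur ≠ [] := by intro h; rw [h] at hq; simp at hq
      simp only [pvGlue, hq]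
      by_cases hl : pvLink q p = true
      · rw [if_pos hl, ih (cur ++ [p]) p List.getLast?_concat]
        have h2 : pvKeepRun (cur ++ [p]) p t = true := by
          have : 1 ≤ cur.length := List.length_pos_iff.mpr hc
          simp [pvKeepRun]; omega
        have hk : pvKeepRun cur q (p :: t) = true := by simp [pvKeepRun, hl]
        rw [h2, hk]
        cases t with
        | nil => simp [pvTail]
        | cons p' t' => simp [pvTail, hl]
      · have hl' : pvLink q p = false := by simpa using hl
        rw [if_neg hl]
        obtain ⟨x, xs, hx⟩ : ∃ x xs, pvGlue [p] t = x :: xs := by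
          cases h : pvGlue [p] t with
          | nil => exact absurd h (pvGlue_ne_nil [p] t)
          | cons x xs => exact ⟨x, xs, rfl⟩
        have hrest : pvEmitRest (cur :: pvGlue [p] t)
            = (if 2 ≤ cur.length then cur else []) ++ pvEmitRest (pvGlue [p] t) := by
          rw [hx]; rfl
        rw [hrest, ih [p] p rfl]
        have hk : pvKeepRun cur q (p :: t) = decide (2 ≤ cur.length) := by
          simp [pvKeepRun, hl']
        rw [hk]
        cases t with
        | nil => simp [pvKeepRun, pvTail]
        | cons p' t' =>
            have hk1 : pvKeepRun [p] p (p' :: t') = pvLink p p' := by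
              simp [pvKeepRun]
            rw [hk1]
            show _ = (if decide (2 ≤ cur.length) = true then cur else [])
              ++ ((if (pvLink q p || pvLink p p') = true then [p] else []) ++ pvTail p (p' :: t'))
            rw [hl', Bool.false_or]
            by_cases h2 : 2 ≤ cur.length <;> simp [h2]

-- the emitted survivors of the grouped list: first run kept, then pvTail
theorem pvEmitAll_glue (l : List (Int × Int)) (cur : List (Int × Int)) (q : Int × Int)
    (hq : cur.getLast? = some q) :
    pvEmitAll (pvGlue cur l) = cur ++ pvTail q l := by
  induction l generalizing cur q with
  | nil => simp [pvGlue, pvEmitAll, pvEmitRest, pvTail]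
  | cons p t ih =>
      have hc : cur ≠ [] := by intro h; rw [h] at hq; simp at hq
      simp only [pvGlue, hq]
      by_cases hl : pvLink q p = true
      · rw [if_pos hl, ih (cur ++ [p]) p List.getLast?_concat]
        cases t with
        | nil => simp [pvTail]
        | cons p' t' => simp [pvTail, hl]
      · have hl' : pvLink q p = false := by simpa using hl
        rw [if_neg hl]
        rw [show pvEmitAll (cur :: pvGlue [p] t) = cur ++ pvEmitRest (pvGlue [p] t) from rfl]
        rw [pvEmitRest_glue t [p] p rfl]
        cases t with
        | nil => simp [pvKeepRun, pvTail]
        | cons p' t' =>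
            have hk1 : pvKeepRun [p] p (p' :: t') = pvLink p p' := by
              simp [pvKeepRun]
            rw [hk1]
            show _ = cur ++ ((if (pvLink q p || pvLink p p') = true then [p] else []) ++ pvTail p (p' :: t'))
            rw [hl', Bool.false_or]

-- B's port, in recursive canonical form: head, then the surviving tail elements
theorem pvB_canon (a : Int × Int) (t : List (Int × Int)) :
    delete_single_match_py_alt (a :: t) = a :: pvTail a t := by
  show (PySem.List.enumerate (if (List.foldl pvStepB (([], []) : List (List (Int × Int)) × List (Int × Int)) (a :: t)).2.isEmpty then _ else _) 0).foldl _ [] = _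
  have hstep : List.foldl pvStepB (([], []) : List (List (Int × Int)) × List (Int × Int)) (a :: t)
      = List.foldl pvStepB ([], [a]) t := by rfl
  rw [hstep, pvFoldGlue t [] [a] (by simp), List.nil_append]
  obtain ⟨x, xs, hx⟩ : ∃ x xs, pvGlue [a] t = x :: xs := by
    cases h : pvGlue [a] t with
    | nil => exact absurd h (pvGlue_ne_nil [a] t)
    | cons x xs => exact ⟨x, xs, rfl⟩
  rw [hx, pvEnumEmit x xs, ← hx, pvEmitAll_glue t [a] a rfl]
  rfl

-- A's window test is adjacency with the left or with the right neighbour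
theorem pvKeep_link (q b c : Int × Int) : pvKeepB q b c = (pvLink q b || pvLink b c) := by
  rw [Bool.eq_iff_iff]
  simp only [pvKeepB, pvLink, Bool.or_eq_true, Bool.and_eq_true, beq_iff_eq]
  constructor <;> (rintro (⟨h1, h2⟩ | ⟨h1, h2⟩) <;> [left; right] <;> constructor <;> omega)

-- for a nonempty list the default of getLastD is irrelevant
theorem pvGetLastD_irrel (x : Int × Int) (l : List (Int × Int)) (d1 d2 : Int × Int) :
    (x :: l).getLastD d1 = (x :: l).getLastD d2 := by
  simp [List.getLastD_eq_getLast?, List.getLast?_cons]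

-- pvTail is exactly: the surviving middles, then the last element
theorem pvTail_mids (t : List (Int × Int)) (q b : Int × Int) :
    pvTail q (b :: t) = pvMids (q :: b :: t) ++ [(b :: t).getLastD (0, 0)] := by
  induction t generalizing q b with
  | nil => rfl
  | cons c r ih =>
      rw [show pvTail q (b :: c :: r)
          = (if (pvLink q b || pvLink b c) = true then [b] else []) ++ pvTail b (c :: r) from rfl]
      rw [ih b c]
      rw [show pvMids (q :: b :: c :: r)
          = (if pvKeepB q b c then [b] else []) ++ pvMids (b :: c :: r) from rfl]
      rw [pvKeep_link, List.append_assoc]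
      have hlast : (b :: c :: r).getLastD (0, 0) = (c :: r).getLastD (0, 0) := by
        rw [List.getLastD_cons]; exact pvGetLastD_irrel c r b (0, 0)
      rw [hlast]

-- ===== VERDICT (by name: the statement is the Claim_ definition above) =====
theorem delete_single_match_py_spec : Claim_equal_delete_single_match_py := by
  intro mp _
  show delete_single_match_py mp = delete_single_match_py_alt mp
  match mp with
  | [] => with_unfolding_all rfl
  | [a] => rw [pvB_canon]; with_unfolding_all rfl
  | [a, b] => rw [pvB_canon]; with_unfolding_all rfl
  | a :: b :: c :: r =>
      rw [pvB_canon, pvA_canon _ (by simp), pvTail_mids]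
      have hget0 : (a :: b :: c :: r).getD 0 (0, 0) = a := rfl
      have hlast : (a :: b :: c :: r).getD ((a :: b :: c :: r).length - 1) (0, 0)
          = (b :: c :: r).getLastD (0, 0) := by
        simp [List.getD_eq_getElem?_getD, List.getLastD_eq_getLast?, List.getLast?_eq_getElem?]
      rw [hget0, hlast]
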